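-- pv_equiv track=rewrite | github.com/SIDED00R/Code_training | 백준/Gold/29737. 브실이는 잔디가 좋아 🌱/브실이는 잔디가 좋아 🌱.py | check
-- ===== SOURCE A (Python) =====
-- def check(matrix, m):
--     line = [0] * (7 * m)
--     for i in range(7):
--         for j in range(m):
--             line[7 * j + i] = matrix[i][j]
--
--     line.append('X')
--
--     long = 0 # 최장길이
--     now_long = 0 # 국소 최장 길이
--
--     freeze_count = 0 # 프리즈 개수
--     now_freeze_count = 0 # 국소 프리즈 개수
--     not_added_freeze = 0
--
--     start_idx = 0
--     start_idx_keep = 0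
--
--     fail_count = 0
--
--     start = False # 스트릭이 이미 시작 했는지 여부
--     for idx in range(7 * m + 1):
--         now = line[idx]
--         if now == 'O':
--             if start:
--                 now_long += 1
--                 now_freeze_count += not_added_freeze
--                 not_added_freeze = 0
--             else:
--                 start = True
--                 now_long = 1
--                 start_idx_keep = idx
--         elif now == 'F':
--             if start:
--                 not_added_freeze += 1
--             else:
--                 continue
--         else:
--             fail_count += 1
--             if start:
--                 start = False
--                 not_added_freeze = 0
--                 if long < now_long:
--                     long = now_long
--                     freeze_count = now_freeze_count
--                     start_idx = start_idx_keep
--                 elif long == now_long: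
--                     if freeze_count > now_freeze_count:
--                         freeze_count = now_freeze_count
--                         start_idx = start_idx_keep
--                 now_long = 0
--                 now_freeze_count = 0
--             else:
--                 continue
--     return [long, freeze_count, start_idx, fail_count]
-- ===== SOURCE B (Python) =====
-- def check(matrix, m):
--     line = [matrix[i][j] for j in range(m) for i in range(7)]
--     line.append('X')
--     segs = []
--     cur = []
--     cur_start = 0
--     fails = 0
--     for idx, c in enumerate(line[:7 * m + 1]):
--         if c == 'O' or c == 'F':
--             cur.append(c)
--         else:
--             segs.append((cur_start, cur))
--             cur = []
--             cur_start = idx + 1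
--             fails += 1
--     segs.append((cur_start, cur))
--     best = (0, 0, 0)
--     for s0, seg in segs:
--         if 'O' in seg:
--             first = seg.index('O')
--             last = len(seg) - 1 - seg[::-1].index('O')
--             length = seg.count('O')
--             freeze = seg[first:last].count('F')
--             if length > best[0] or (length == best[0] and freeze < best[1]):
--                 best = (length, freeze, s0 + first)
--     return [best[0], best[1], best[2], fails]
-- ===== Notes on version B (the rewrite author's own statement) =====
-- stated objective: alternative
-- what changed: A's single pass with a 9-variable streak state machine is replaced by a two-phase decomposition: split the transposed line into maximal O/F runs (counting the separators), then summarise each run with index/count/slice and reduce the summaries to the best streak.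
import Mathlib
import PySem

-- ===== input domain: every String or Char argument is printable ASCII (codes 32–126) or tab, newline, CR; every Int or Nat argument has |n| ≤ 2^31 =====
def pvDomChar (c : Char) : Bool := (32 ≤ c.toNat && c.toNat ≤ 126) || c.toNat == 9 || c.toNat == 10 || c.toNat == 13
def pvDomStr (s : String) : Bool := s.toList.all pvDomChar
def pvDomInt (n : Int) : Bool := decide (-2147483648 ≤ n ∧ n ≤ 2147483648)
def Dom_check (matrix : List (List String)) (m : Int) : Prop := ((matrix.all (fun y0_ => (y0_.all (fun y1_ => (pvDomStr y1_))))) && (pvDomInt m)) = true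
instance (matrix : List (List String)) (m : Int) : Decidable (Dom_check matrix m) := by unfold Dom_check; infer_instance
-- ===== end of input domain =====

-- B replaces A's single-pass 9-variable state machine by a two-phase decomposition (split the
-- transposed line into maximal O/F runs, then summarise each run with index/count/slice);
-- objective: alternative structure, same asymptotic cost.

-- ===== PORT A =====
structure AState where
  long : Int
  nowLong : Int
  freeze : Int
  nowFreeze : Int
  notAdded : Int
  startIdx : Int
  startIdxKeep : Int
  fail : Int
  start : Bool
deriving Repr, DecidableEq

def stepA (s : AState) (idx : Int) (now : String) : AState :=
  if now == "O" then
    if s.start then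
      { s with nowLong := s.nowLong + 1, nowFreeze := s.nowFreeze + s.notAdded, notAdded := 0 }
    else
      { s with start := true, nowLong := 1, startIdxKeep := idx }
  else if now == "F" then
    if s.start then { s with notAdded := s.notAdded + 1 } else s
  else
    let s1 := { s with fail := s.fail + 1 }
    if s1.start then
      let s2 := { s1 with start := false, notAdded := 0 }
      let s3 :=
        if s2.long < s2.nowLong then
          { s2 with long := s2.nowLong, freeze := s2.nowFreeze, startIdx := s2.startIdxKeep }
        else if s2.long == s2.nowLong then
          if s2.freeze > s2.nowFreeze then
            { s2 with freeze := s2.nowFreeze, startIdx := s2.startIdxKeep }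
          else s2
        else s2
      { s3 with nowLong := 0, nowFreeze := 0 }
    else s1

-- A's 'line = [0]*(7*m)' then 'line[7*j+i] = matrix[i][j]'; the int placeholder 0 is modelled by ""
-- (every kept cell is overwritten under Pre_); pyGetD defaults never fire under Pre_.
def buildLine (matrix : List (List String)) (m : Int) : List String :=
  (PySem.List.pyRange 0 7 1).foldl (fun line i =>
    (PySem.List.pyRange 0 m 1).foldl (fun line j =>
      PySem.List.pySetD line (7 * j + i)
        (PySem.List.pyGetD (PySem.List.pyGetD matrix i []) j "")) line)
    (List.replicate (7 * m).toNat "")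

def initA : AState := ⟨0, 0, 0, 0, 0, 0, 0, 0, false⟩

def check (matrix : List (List String)) (m : Int) : List Int :=
  let line := buildLine matrix m ++ ["X"]
  let fin := (PySem.List.pyRange 0 (7 * m + 1) 1).foldl
    (fun s idx => stepA s idx (PySem.List.pyGetD line idx "")) initA
  [fin.long, fin.freeze, fin.startIdx, fin.fail]

-- ===== PORT B =====
structure BState where
  segs : List (Int × List String)
  cur : List String
  curStart : Int
  fails : Int
deriving Repr, DecidableEq

def segStep (st : BState) (p : Int × String) : BState :=
  if p.2 == "O" || p.2 == "F" then
    { st with cur := st.cur ++ [p.2] }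
  else
    { segs := st.segs ++ [(st.curStart, st.cur)], cur := [], curStart := p.1 + 1,
      fails := st.fails + 1 }

-- per-run summary; .index defaults never fire: they are guarded by '"O" ∈ seg'
def summarize (best : Int × Int × Int) (sp : Int × List String) : Int × Int × Int :=
  let seg := sp.2
  if "O" ∈ seg then
    let first : Int := ((PySem.List.index? seg "O").getD 0 : Nat)
    let last : Int := (seg.length : Int) - 1 - (((PySem.List.index? seg.reverse "O").getD 0 : Nat) : Int)
    let length : Int := (PySem.List.count seg "O" : Nat)
    let freeze : Int := (PySem.List.count (PySem.List.slice seg (some first) (some last)) "F" : Nat)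
    if length > best.1 ∨ (length = best.1 ∧ freeze < best.2.1) then
      (length, freeze, sp.1 + first)
    else best
  else best

def buildLineAlt (matrix : List (List String)) (m : Int) : List String :=
  (PySem.List.pyRange 0 m 1).flatMap (fun j =>
    (PySem.List.pyRange 0 7 1).map (fun i =>
      PySem.List.pyGetD (PySem.List.pyGetD matrix i []) j ""))

def check_alt (matrix : List (List String)) (m : Int) : List Int :=
  let line := buildLineAlt matrix m ++ ["X"]
  let scan := PySem.List.slice line none (some (7 * m + 1))
  let st := (PySem.List.enumerate scan 0).foldl segStep ⟨[], [], 0, 0⟩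
  let best := (st.segs ++ [(st.curStart, st.cur)]).foldl summarize (0, 0, 0)
  [best.1, best.2.1, best.2.2, st.fails]

-- ===== PRECONDITION & SPEC =====
-- Pre_ excludes exactly the inputs on which A raises IndexError: when m ≥ 1, A indexes
-- matrix[i][j] for every i < 7, j < m, so the grid needs at least 7 rows of at least m cells.
def Pre_check (matrix : List (List String)) (m : Int) : Prop :=
  1 ≤ m → (7 ≤ matrix.length ∧ ∀ row ∈ matrix.take 7, m ≤ (row.length : Int))
instance (matrix : List (List String)) (m : Int) : Decidable (Pre_check matrix m) := by
  unfold Pre_check; infer_instance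

def pvWitness_check : List (List String) × Int :=
  ([["O"], ["F"], ["X"], ["O"], ["O"], ["F"], ["O"]], 1)

def Spec_check (matrix : List (List String)) (m : Int) (out : List Int) : Prop := out = check_alt matrix m
instance (matrix : List (List String)) (m : Int) (out : List Int) : Decidable (Spec_check matrix m out) := by unfold Spec_check; infer_instance

-- ===== CLAIM (what is proved, stated in full; the proofs are below) =====
def Claim_equal_check : Prop := ∀ (matrix : List (List String)) (m : Int), Dom_check matrix m → Pre_check matrix m → Spec_check matrix m (check matrix m)

-- ===== LEMMAS AND PROOFS =====


-- ---- proof-side helpers ----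

def firstO : List String → Nat
  | [] => 0
  | c :: t => if c = "O" then 0 else firstO t + 1

def dropO : List String → List String
  | [] => []
  | c :: t => if c = "O" then t else dropO t

def trailF (l : List String) : Nat := List.count "F" (l.reverse.takeWhile (fun c => !(c == "O")))
def afterF (l : List String) : Nat := List.count "F" (dropO l)

def RelAB (st : BState) (s : AState) : Prop :=
  s.start = st.cur.contains "O" ∧
  s.nowLong = (List.count "O" st.cur : Int) ∧
  ("O" ∈ st.cur →
    s.startIdxKeep = st.curStart + (firstO st.cur : Int) ∧
    s.notAdded = (trailF st.cur : Int) ∧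
    s.nowFreeze + (trailF st.cur : Int) = (afterF st.cur : Int)) ∧
  ("O" ∉ st.cur → s.nowFreeze = 0 ∧ s.notAdded = 0) ∧
  (s.long, s.freeze, s.startIdx) = st.segs.foldl summarize (0, 0, 0) ∧
  s.fail = st.fails

lemma firstO_append_left (l l' : List String) (h : "O" ∈ l) : firstO (l ++ l') = firstO l := by
  induction l with
  | nil => simp at h
  | cons c t ih =>
    by_cases hc : c = "O"
    · simp [firstO, hc]
    · have ht : "O" ∈ t := by
        rcases List.mem_cons.mp h with h1 | h2
        · exact absurd h1.symm hc
        · exact h2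
      simp [firstO, hc, ih ht]

lemma firstO_decomp (a b : List String) (h : "O" ∉ a) :
    firstO (a ++ "O" :: b) = a.length := by
  induction a with
  | nil => simp [firstO]
  | cons c t ih =>
    simp at h
    have hc : ¬ c = "O" := fun hh => h.1 hh.symm
    simp [firstO, hc, ih h.2]

lemma dropO_append_left (l l' : List String) (h : "O" ∈ l) :
    dropO (l ++ l') = dropO l ++ l' := by
  induction l with
  | nil => simp at h
  | cons c t ih =>
    by_cases hc : c = "O"
    · simp [dropO, hc]
    · have ht : "O" ∈ t := by
        rcases List.mem_cons.mp h with h1 | h2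
        · exact absurd h1.symm hc
        · exact h2
      simp [dropO, hc, ih ht]

lemma dropO_decomp (a b : List String) (h : "O" ∉ a) :
    dropO (a ++ "O" :: b) = b := by
  induction a with
  | nil => simp [dropO]
  | cons c t ih =>
    simp at h
    have hc : ¬ c = "O" := fun hh => h.1 hh.symm
    simp [dropO, hc, ih h.2]

lemma trailF_append_O (l : List String) : trailF (l ++ ["O"]) = 0 := by
  simp [trailF]

lemma trailF_append_F (l : List String) : trailF (l ++ ["F"]) = trailF l + 1 := by
  simp [trailF]

lemma trailF_decomp (p t : List String) (h : "O" ∉ t) :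
    trailF (p ++ "O" :: t) = List.count "F" t := by
  have hall : List.takeWhile (fun c => !(c == "O")) t.reverse = t.reverse := by
    rw [List.takeWhile_eq_self_iff]
    intro x hx
    simp at hx ⊢
    intro hxO; exact h (hxO ▸ hx)
  simp [trailF, List.takeWhile_append, hall]

lemma exists_first_decomp {l : List String} (h : "O" ∈ l) :
    ∃ a b, l = a ++ "O" :: b ∧ "O" ∉ a := by
  induction l with
  | nil => simp at h
  | cons c t ih =>
    by_cases hc : c = "O"
    · exact ⟨[], t, by simp [hc], by simp⟩
    · have ht : "O" ∈ t := by simpa [hc, eq_comm] using h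
      obtain ⟨a, b, hab, hOa⟩ := ih ht
      exact ⟨c :: a, b, by simp [hab], by simp [hOa, hc, eq_comm] ⟩

lemma exists_last_decomp {l : List String} (h : "O" ∈ l) :
    ∃ p t, l = p ++ "O" :: t ∧ "O" ∉ t := by
  induction l with
  | nil => simp at h
  | cons c t ih =>
    by_cases ht : "O" ∈ t
    · obtain ⟨p, t', hpt, hOt⟩ := ih ht
      exact ⟨c :: p, t', by simp [hpt], hOt⟩
    · have hc : c = "O" := by rcases (List.mem_cons.mp h) with h1 | h2; exact h1.symm; exact absurd h2 ht
      exact ⟨[], t, by simp [hc], ht⟩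


lemma index?_decomp (a b : List String) (h : "O" ∉ a) :
    PySem.List.index? (a ++ "O" :: b) "O" = some a.length :=
  (PySem.List.index?_eq_some_iff _ _ _).mpr ⟨a, b, rfl, rfl, h⟩

lemma count_O_cons_F (t : List String) : List.count "F" (("O" : String) :: t) = List.count "F" t := by
  simp

-- what B's per-run summary computes on a run that contains an 'O', in terms of A's accumulators
lemma summarize_eq (best : Int × Int × Int) (cs : Int) (cur : List String)
    (hO : "O" ∈ cur) (nf : Int)
    (hF : nf + (trailF cur : Int) = (afterF cur : Int)) :
    summarize best (cs, cur) =
      if (List.count "O" cur : Int) > best.1 ∨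
         ((List.count "O" cur : Int) = best.1 ∧ nf < best.2.1) then
        ((List.count "O" cur : Int), nf, cs + (firstO cur : Int))
      else best := by
  obtain ⟨a, b, hab, hOa⟩ := exists_first_decomp hO
  have hfirst : PySem.List.index? cur "O" = some a.length := hab ▸ index?_decomp a b hOa
  by_cases hOb : "O" ∈ b
  · -- two or more O's: cur = a ++ "O" :: mid ++ "O" :: t, "O" ∉ a, "O" ∉ t
    obtain ⟨mid, t, hbt, hOt⟩ := exists_last_decomp hOb
    have hcur : cur = a ++ "O" :: (mid ++ "O" :: t) := by rw [hab, hbt]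
    have hrev : cur.reverse = t.reverse ++ "O" :: (mid.reverse ++ "O" :: a.reverse) := by
      subst hcur; simp
    have hOtr : "O" ∉ t.reverse := by simpa using hOt
    have hlast : PySem.List.index? cur.reverse "O" = some t.length := by
      rw [hrev, index?_decomp _ _ hOtr, List.length_reverse]
    have hlen : cur.length = a.length + 1 + mid.length + 1 + t.length := by
      subst hcur; simp; omega
    have hlastval : (cur.length : Int) - 1 - ((t.length : Nat) : Int)
        = ((a.length + mid.length + 1 : Nat) : Int) := by
      rw [hlen]; push_cast; ring
    have hslice : PySem.List.slice cur (some ((a.length : Nat) : Int))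
        (some ((a.length + mid.length + 1 : Nat) : Int)) = "O" :: mid := by
      rw [PySem.List.slice_natCast]
      have h1 : a.length + mid.length + 1 - a.length = mid.length + 1 := by omega
      rw [hcur, List.drop_left, h1, List.take_succ_cons, List.take_left]
    have hafter : afterF cur = List.count "F" mid + List.count "F" ("O" :: t) := by
      rw [afterF, hcur, dropO_decomp _ _ hOa, List.count_append]
    have htrail : trailF cur = List.count "F" t := by
      have : cur = (a ++ "O" :: mid) ++ "O" :: t := by rw [hcur]; simp
      rw [this, trailF_decomp _ _ hOt]
    have hnf : nf = (List.count "F" ("O" :: mid) : Int) := by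
      rw [count_O_cons_F]
      rw [hafter, htrail, count_O_cons_F] at hF
      push_cast at hF ⊢
      omega
    show summarize best (cs, cur) = _
    rw [summarize]
    simp only [hO, if_pos, hfirst, hlast, Option.getD_some]
    rw [PySem.List.count_eq, hlastval, hslice, PySem.List.count_eq, ← hnf]
    have hfo : firstO cur = a.length := by rw [hcur]; exact firstO_decomp _ _ hOa
    rw [hfo]
  · -- single O: cur = a ++ "O" :: b with "O" ∉ a, "O" ∉ b
    have hrev : cur.reverse = b.reverse ++ "O" :: a.reverse := by subst hab; simp
    have hObr : "O" ∉ b.reverse := by simpa using hOb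
    have hlast : PySem.List.index? cur.reverse "O" = some b.length := by
      rw [hrev, index?_decomp _ _ hObr, List.length_reverse]
    have hlen : cur.length = a.length + 1 + b.length := by subst hab; simp; omega
    have hlastval : (cur.length : Int) - 1 - ((b.length : Nat) : Int)
        = ((a.length : Nat) : Int) := by
      rw [hlen]; push_cast; ring
    have hslice : PySem.List.slice cur (some ((a.length : Nat) : Int))
        (some ((a.length : Nat) : Int)) = [] := by
      rw [PySem.List.slice_natCast]
      simp
    have hafter : afterF cur = List.count "F" b := by
      rw [afterF, hab, dropO_decomp _ _ hOa]
    have htrail : trailF cur = List.count "F" b := by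
      rw [hab, trailF_decomp _ _ hOb]
    have hnf : nf = 0 := by rw [hafter, htrail] at hF; omega
    rw [summarize]
    simp only [hO, if_pos, hfirst, hlast, Option.getD_some]
    rw [PySem.List.count_eq, hlastval, hslice, PySem.List.count_eq, hnf]
    have hfo : firstO cur = a.length := by rw [hab]; exact firstO_decomp _ _ hOa
    rw [hfo]
    simp

lemma summarize_noO (best : Int × Int × Int) (cs : Int) (cur : List String)
    (hO : "O" ∉ cur) : summarize best (cs, cur) = best := by
  rw [summarize]; simp [hO]


lemma contains_true_of_mem {l : List String} (h : "O" ∈ l) : l.contains "O" = true := by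
  simpa using h

lemma contains_false_of_not_mem {l : List String} (h : "O" ∉ l) : l.contains "O" = false := by
  simpa using h

-- one character of the line preserves the simulation relation between A's state machine
-- and B's run-splitting state
lemma step_rel (st : BState) (s : AState) (n : Int) (c : String)
    (h : RelAB st s) (hn : st.curStart + (st.cur.length : Int) = n) :
    RelAB (segStep st (n, c)) (stepA s n c) ∧
    (segStep st (n, c)).curStart + ((segStep st (n, c)).cur.length : Int) = n + 1 := by
  obtain ⟨h1, h2, h3, h4, h5, h6⟩ := h
  by_cases hcO : c = "O"
  · subst hcO
    have hstB : segStep st (n, "O") = { st with cur := st.cur ++ ["O"] } := by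
      simp [segStep]
    by_cases hO : "O" ∈ st.cur
    · have hstart : s.start = true := by rw [h1]; exact contains_true_of_mem hO
      have hstA : stepA s n "O" =
          { s with nowLong := s.nowLong + 1, nowFreeze := s.nowFreeze + s.notAdded,
                   notAdded := 0 } := by
        simp [stepA, hstart]
      obtain ⟨k1, k2, k3⟩ := h3 hO
      refine ⟨⟨?_, ?_, ?_, ?_, ?_, ?_⟩, ?_⟩
      · rw [hstA, hstB]
        simp [hstart]
      · rw [hstA, hstB]; simp [List.count_append]; omega
      · intro _
        rw [hstA, hstB]
        refine ⟨?_, ?_, ?_⟩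
        · simpa [firstO_append_left _ _ hO] using k1
        · simp [trailF_append_O]
        · simp only [trailF_append_O, afterF, dropO_append_left _ _ hO, List.count_append]
          have : List.count "F" ["O"] = 0 := by decide
          rw [this]
          rw [afterF] at k3
          push_cast
          omega
      · intro hno; rw [hstB] at hno; simp at hno
      · rw [hstA, hstB]; simpa using h5
      · rw [hstA, hstB]; simpa using h6
      · rw [hstB]; simp; omega
    · have hstart : s.start = false := by rw [h1]; exact contains_false_of_not_mem hO
      have hstA : stepA s n "O" =
          { s with start := true, nowLong := 1, startIdxKeep := n } := by
        simp [stepA, hstart]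
      obtain ⟨k1, k2⟩ := h4 hO
      have hcnt : List.count "O" st.cur = 0 := List.count_eq_zero.mpr hO
      refine ⟨⟨?_, ?_, ?_, ?_, ?_, ?_⟩, ?_⟩
      · rw [hstA, hstB]
        simp
      · rw [hstA, hstB]; simp [List.count_append, hcnt]
      · intro _
        rw [hstA, hstB]
        have hfo : firstO (st.cur ++ ["O"]) = st.cur.length := by
          simpa using firstO_decomp st.cur [] hO
        have hdo : dropO (st.cur ++ ["O"]) = [] := by
          simpa using dropO_decomp st.cur [] hO
        refine ⟨?_, ?_, ?_⟩
        · simp [hfo]; omega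
        · simp [trailF_append_O, k2]
        · simp [trailF_append_O, afterF, hdo, k1]
      · intro hno; rw [hstB] at hno; simp at hno
      · rw [hstA, hstB]; simpa using h5
      · rw [hstA, hstB]; simpa using h6
      · rw [hstB]; simp; omega
  · by_cases hcF : c = "F"
    · subst hcF
      have hstB : segStep st (n, "F") = { st with cur := st.cur ++ ["F"] } := by
        simp [segStep]
      have hOF : ("O" : String) ≠ "F" := by decide
      by_cases hO : "O" ∈ st.cur
      · have hstart : s.start = true := by rw [h1]; exact contains_true_of_mem hO
        have hstA : stepA s n "F" = { s with notAdded := s.notAdded + 1 } := by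
          simp [stepA, hstart]
        obtain ⟨k1, k2, k3⟩ := h3 hO
        have hmem : "O" ∈ st.cur ++ ["F"] := by simp [hO]
        refine ⟨⟨?_, ?_, ?_, ?_, ?_, ?_⟩, ?_⟩
        · rw [hstA, hstB]; simp [hstart, hO]
        · rw [hstA, hstB]
          have : List.count "O" ["F"] = 0 := by decide
          simp [List.count_append, this, h2]
        · intro _
          rw [hstA, hstB]
          refine ⟨?_, ?_, ?_⟩
          · simpa [firstO_append_left _ _ hO] using k1
          · simp [trailF_append_F]; omega
          · have : List.count "F" ["F"] = 1 := by decide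
            simp only [trailF_append_F, afterF, dropO_append_left _ _ hO,
              List.count_append, this]
            rw [afterF] at k3
            push_cast
            omega
        · intro hno; rw [hstB] at hno; exact absurd hmem (by simpa using hno)
        · rw [hstA, hstB]; simpa using h5
        · rw [hstA, hstB]; simpa using h6
        · rw [hstB]; simp; omega
      · have hstart : s.start = false := by rw [h1]; exact contains_false_of_not_mem hO
        have hstA : stepA s n "F" = s := by
          simp [stepA, hstart]
        have hnm : "O" ∉ st.cur ++ ["F"] := by
          simp [hO, hOF]
        refine ⟨⟨?_, ?_, ?_, ?_, ?_, ?_⟩, ?_⟩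
        · rw [hstA, hstB]; simp [hstart, hO, hOF]
        · rw [hstA, hstB]
          have : List.count "O" ["F"] = 0 := by decide
          simp [List.count_append, this, h2]
        · intro hmem; rw [hstB] at hmem; exact absurd (by simpa using hmem) hnm
        · intro _; rw [hstA]; exact h4 hO
        · rw [hstA, hstB]; simpa using h5
        · rw [hstA, hstB]; simpa using h6
        · rw [hstB]; simp; omega
    · -- a fail character: B closes the current run, A folds its local counters into the best
      have hstB : segStep st (n, c) =
          { segs := st.segs ++ [(st.curStart, st.cur)], cur := [], curStart := n + 1,
            fails := st.fails + 1 } := by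
        simp [segStep, hcO, hcF]
      by_cases hO : "O" ∈ st.cur
      · have hstart : s.start = true := by rw [h1]; exact contains_true_of_mem hO
        obtain ⟨k1, k2, k3⟩ := h3 hO
        have hstA : stepA s n c =
            (if s.long < s.nowLong then
              { s with fail := s.fail + 1, start := false, notAdded := 0,
                       long := s.nowLong, freeze := s.nowFreeze, startIdx := s.startIdxKeep,
                       nowLong := 0, nowFreeze := 0 }
            else if s.long = s.nowLong then
              if s.freeze > s.nowFreeze then
                { s with fail := s.fail + 1, start := false, notAdded := 0,
                         freeze := s.nowFreeze, startIdx := s.startIdxKeep,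
                         nowLong := 0, nowFreeze := 0 }
              else
                { s with fail := s.fail + 1, start := false, notAdded := 0,
                         nowLong := 0, nowFreeze := 0 }
            else
              { s with fail := s.fail + 1, start := false, notAdded := 0,
                       nowLong := 0, nowFreeze := 0 }) := by
          simp [stepA, hcO, hcF, hstart]
          split_ifs <;> rfl
        have hfold : (st.segs ++ [(st.curStart, st.cur)]).foldl summarize (0, 0, 0) =
            summarize (s.long, s.freeze, s.startIdx) (st.curStart, st.cur) := by
          rw [List.foldl_append, ← h5]
          rfl
        have hsum := summarize_eq (s.long, s.freeze, s.startIdx) st.curStart st.cur hO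
          s.nowFreeze k3
        refine ⟨⟨?_, ?_, ?_, ?_, ?_, ?_⟩, ?_⟩
        · rw [hstA, hstB]; split_ifs <;> simp
        · rw [hstA, hstB]; split_ifs <;> simp
        · intro hmem; rw [hstB] at hmem; simp at hmem
        · intro _; rw [hstA]; split_ifs <;> simp
        · rw [hstA, hstB]
          simp only
          rw [hfold, hsum]
          rw [← h2, ← k1]
          split_ifs with w1 w2 w3 w4 w5 <;> simp_all <;> omega
        · rw [hstA, hstB]; split_ifs <;> (simp; omega)
        · rw [hstB]; simp
      · have hstart : s.start = false := by rw [h1]; exact contains_false_of_not_mem hO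
        have hstA : stepA s n c = { s with fail := s.fail + 1 } := by
          simp [stepA, hcO, hcF, hstart]
        have hfold : (st.segs ++ [(st.curStart, st.cur)]).foldl summarize (0, 0, 0) =
            st.segs.foldl summarize (0, 0, 0) := by
          rw [List.foldl_append]
          show summarize _ _ = _
          rw [summarize_noO _ _ _ hO]
        refine ⟨⟨?_, ?_, ?_, ?_, ?_, ?_⟩, ?_⟩
        · rw [hstA, hstB]; simp [hstart]
        · rw [hstA, hstB]
          simp [h2, List.count_eq_zero.mpr hO]
        · intro hmem; rw [hstB] at hmem; simp at hmem
        · intro _; rw [hstA]; exact h4 hO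
        · rw [hstA, hstB]; simp only; rw [hfold]; exact h5
        · rw [hstA, hstB]; simp; omega
        · rw [hstB]; simp


-- the simulation, iterated over a whole run of the line
lemma loop_rel (ws : List String) : ∀ (n : Int) (st : BState) (s : AState),
    RelAB st s → st.curStart + (st.cur.length : Int) = n →
    RelAB ((PySem.List.enumerate ws n).foldl segStep st)
        ((PySem.List.enumerate ws n).foldl (fun s p => stepA s p.1 p.2) s) ∧
    ((PySem.List.enumerate ws n).foldl segStep st).curStart +
      (((PySem.List.enumerate ws n).foldl segStep st).cur.length : Int) = n + ws.length := by
  induction ws with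
  | nil =>
    intro n st s h hn
    simpa [PySem.List.enumerate] using ⟨h, hn⟩
  | cons c t ih =>
    intro n st s h hn
    rw [PySem.List.enumerate_cons]
    simp only [List.foldl_cons]
    obtain ⟨h', hn'⟩ := step_rel st s n c h hn
    obtain ⟨r1, r2⟩ := ih (n + 1) _ _ h' hn'
    refine ⟨r1, ?_⟩
    rw [r2]
    simp only [List.length_cons]
    push_cast
    ring

def cellN (matrix : List (List String)) (i j : Nat) : String :=
  PySem.List.pyGetD (PySem.List.pyGetD matrix (i : Int) []) (j : Int) ""

lemma inner_len (matrix : List (List String)) (i : Int) (c : Nat) (l : List String) :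
    ((PySem.List.pyRange 0 (c : Int) 1).foldl
      (fun line j => PySem.List.pySetD line (7 * j + i)
        (PySem.List.pyGetD (PySem.List.pyGetD matrix i []) j "")) l).length = l.length := by
  induction c with
  | zero => simp [PySem.List.pyRange_one_eq_nil]
  | succ c ih =>
    have hc : ((c + 1 : Nat) : Int) = (c : Int) + 1 := by push_cast; ring
    rw [hc, PySem.List.pyRange_one_succ_right (by positivity), List.foldl_append]
    simp [PySem.List.length_pySetD, ih]

lemma inner_spec (matrix : List (List String)) (i : Int) (h0 : 0 ≤ i) (h7 : i < 7) :
    ∀ (c : Nat) (l : List String), 7 * c ≤ l.length → ∀ (k : Nat),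
    ((PySem.List.pyRange 0 (c : Int) 1).foldl
      (fun line j => PySem.List.pySetD line (7 * j + i)
        (PySem.List.pyGetD (PySem.List.pyGetD matrix i []) j "")) l)[k]?
      = if k % 7 = i.toNat ∧ k / 7 < c then some (cellN matrix i.toNat (k / 7)) else l[k]? := by
  intro c
  induction c with
  | zero =>
    intro l _ k
    simp [PySem.List.pyRange_one_eq_nil]
  | succ c ih =>
    intro l hl k
    have hc : ((c + 1 : Nat) : Int) = (c : Int) + 1 := by push_cast; ring
    rw [hc, PySem.List.pyRange_one_succ_right (by positivity), List.foldl_append]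
    simp only [List.foldl_cons, List.foldl_nil]
    have hLlen : _ = l.length := inner_len matrix i c l
    have hset : PySem.List.pySetD
        ((PySem.List.pyRange 0 (c : Int) 1).foldl
          (fun line j => PySem.List.pySetD line (7 * j + i)
            (PySem.List.pyGetD (PySem.List.pyGetD matrix i []) j "")) l)
        (7 * (c : Int) + i) (PySem.List.pyGetD (PySem.List.pyGetD matrix i []) (c : Int) "")
        = _ := PySem.List.pySetD_of_nonneg _ _ (by omega)
    rw [hset]
    have htn : ((7 * (c : Int) + i)).toNat = 7 * c + i.toNat := by omega
    rw [htn, List.getElem?_set]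
    by_cases hk : 7 * c + i.toNat = k
    · have hklt : 7 * c + i.toNat < l.length := by omega
      rw [if_pos hk, if_pos (by rw [hLlen]; exact hk ▸ hklt)]
      have hcond : k % 7 = i.toNat ∧ k / 7 < c + 1 := by omega
      rw [if_pos hcond]
      have hdiv : k / 7 = c := by omega
      have hi : ((i.toNat : Nat) : Int) = i := Int.toNat_of_nonneg h0
      rw [hdiv, cellN, hi]
    · rw [if_neg hk, ih l (by omega) k]
      by_cases hcond : k % 7 = i.toNat ∧ k / 7 < c
      · rw [if_pos hcond, if_pos ⟨hcond.1, by omega⟩]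
      · rw [if_neg hcond, if_neg (by omega)]

lemma stack_spec (matrix : List (List String)) (M : Nat) :
    ∀ (is : List Int), (∀ i ∈ is, 0 ≤ i ∧ i < 7) → ∀ (l : List String), 7 * M ≤ l.length →
    ∀ (k : Nat),
    (is.foldl (fun line i =>
        (PySem.List.pyRange 0 (M : Int) 1).foldl
          (fun line j => PySem.List.pySetD line (7 * j + i)
            (PySem.List.pyGetD (PySem.List.pyGetD matrix i []) j "")) line) l)[k]?
      = if ((k % 7 : Nat) : Int) ∈ is ∧ k / 7 < M then
          some (cellN matrix (k % 7) (k / 7)) else l[k]? := by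
  intro is
  induction is with
  | nil => intro _ l _ k; simp
  | cons i t ih =>
    intro hmem l hl k
    obtain ⟨hi0, hi7⟩ := hmem i (by simp)
    simp only [List.foldl_cons]
    rw [ih (fun j hj => hmem j (by simp [hj])) _ (by rw [inner_len]; exact hl) k]
    rw [inner_spec matrix i hi0 hi7 M l hl k]
    by_cases hdiv : k / 7 < M
    · by_cases hti : ((k % 7 : Nat) : Int) ∈ t
      · rw [if_pos ⟨hti, hdiv⟩, if_pos ⟨List.mem_cons_of_mem _ hti, hdiv⟩]
      · rw [if_neg (fun hc => hti hc.1)]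
        by_cases hei : k % 7 = i.toNat
        · have hie : ((k % 7 : Nat) : Int) = i := by omega
          rw [if_pos ⟨hei, hdiv⟩, if_pos ⟨by rw [hie]; exact List.mem_cons_self, hdiv⟩]
          rw [hei]
        · rw [if_neg (fun hc => hei hc.1), if_neg ?_]
          rintro ⟨hmem', -⟩
          rcases List.mem_cons.mp hmem' with he | ht
          · exact hei (by omega)
          · exact hti ht
    · rw [if_neg (fun hc => hdiv hc.2), if_neg (fun hc => hdiv hc.2),
        if_neg (fun hc => hdiv hc.2)]

lemma buildLine_eq_T (matrix : List (List String)) (M : Nat) :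
    buildLine matrix (M : Int)
      = (List.range (7 * M)).map (fun k => cellN matrix (k % 7) (k / 7)) := by
  have h7 : PySem.List.pyRange 0 7 1 = [0, 1, 2, 3, 4, 5, 6] := by decide
  have hM : ((7 : Int) * (M : Int)).toNat = 7 * M := by omega
  unfold buildLine
  rw [h7]
  apply List.ext_getElem?
  intro k
  have hrep : (List.replicate ((7 * (M : Int)).toNat) ("" : String)).length = 7 * M := by
    simp [hM]
  rw [stack_spec matrix M [0, 1, 2, 3, 4, 5, 6] (by decide) _ (by rw [hrep]) k]
  have hR : ((List.range (7 * M)).map (fun k => cellN matrix (k % 7) (k / 7)))[k]?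
      = if k < 7 * M then some (cellN matrix (k % 7) (k / 7)) else none := by
    rw [List.getElem?_map]
    by_cases hk : k < 7 * M
    · rw [if_pos hk, List.getElem?_range hk]
      rfl
    · rw [if_neg hk]
      have : (List.range (7 * M))[k]? = none := by simp; omega
      rw [this]
      rfl
  rw [hR]
  by_cases hk : k < 7 * M
  · have h7k : k % 7 < 7 := by omega
    rw [if_pos hk, if_pos ⟨by interval_cases h : k % 7 <;> decide, by omega⟩]
  · rw [if_neg hk, if_neg (fun hc => absurd hc.2 (by omega)), List.getElem?_replicate,
      if_neg (by omega)]



lemma grid_eq (matrix : List (List String)) (M : Nat) :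
    (List.range M).flatMap (fun j =>
        [cellN matrix 0 j, cellN matrix 1 j, cellN matrix 2 j, cellN matrix 3 j,
         cellN matrix 4 j, cellN matrix 5 j, cellN matrix 6 j])
      = (List.range (7 * M)).map (fun k => cellN matrix (k % 7) (k / 7)) := by
  induction M with
  | zero => simp
  | succ M ih =>
    rw [List.range_succ, List.flatMap_append, ih]
    have h75 : 7 * (M + 1) = 7 * M + 7 := by ring
    rw [h75, List.range_add, List.map_append, List.map_map]
    congr 1
    have d : ∀ i : Nat, i < 7 →
        cellN matrix ((7 * M + i) % 7) ((7 * M + i) / 7) = cellN matrix i M := by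
      intro i hi
      have e1 : (7 * M + i) % 7 = i := by omega
      have e2 : (7 * M + i) / 7 = M := by omega
      rw [e1, e2]
    rw [show List.range 7 = [0, 1, 2, 3, 4, 5, 6] from rfl]
    simp only [List.map_cons, List.map_nil, Function.comp]
    rw [d 0 (by omega), d 1 (by omega), d 2 (by omega), d 3 (by omega), d 4 (by omega),
      d 5 (by omega), d 6 (by omega)]
    simp

lemma buildLineAlt_eq_T (matrix : List (List String)) (M : Nat) :
    buildLineAlt matrix (M : Int)
      = (List.range (7 * M)).map (fun k => cellN matrix (k % 7) (k / 7)) := by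
  have h7 : PySem.List.pyRange 0 7 1 = [0, 1, 2, 3, 4, 5, 6] := by decide
  have step1 : buildLineAlt matrix (M : Int)
      = (List.range M).flatMap (fun j =>
          [cellN matrix 0 j, cellN matrix 1 j, cellN matrix 2 j, cellN matrix 3 j,
           cellN matrix 4 j, cellN matrix 5 j, cellN matrix 6 j]) := by
    unfold buildLineAlt
    rw [h7, PySem.List.pyRange_one]
    simp [cellN, List.flatMap_map]
  rw [step1, grid_eq]

-- ===== VERDICT (by name: the statement is the Claim_ definition above) =====
theorem check_spec : Claim_equal_check := by
  intro matrix m _ _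
  show Spec_check _ _ _
  unfold Spec_check
  show check matrix m = check_alt matrix m
  simp only [check, check_alt]
  by_cases hm : 0 ≤ m
  · obtain ⟨M, rfl⟩ : ∃ M : Nat, m = (M : Int) := ⟨m.toNat, (Int.toNat_of_nonneg hm).symm⟩
    rw [buildLine_eq_T matrix M, buildLineAlt_eq_T matrix M]
    set T := (List.range (7 * M)).map (fun k => cellN matrix (k % 7) (k / 7)) with hT
    have hTlen : T.length = 7 * M := by rw [hT]; simp
    have hslice : PySem.List.slice (T ++ ["X"]) none (some (7 * (M : Int) + 1))
        = T ++ ["X"] := by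
      rw [PySem.List.slice_to _ (b := 7 * (M : Int) + 1) (by omega)]
      have : ((7 * (M : Int) + 1)).toNat = (T ++ ["X"]).length := by
        simp [hTlen]; omega
      rw [this, List.take_length]
    rw [hslice]
    have hlen : (7 * (M : Int) + 1) = PySem.List.len (T ++ ["X"]) := by
      simp [PySem.List.len, hTlen]
    have hconv : (PySem.List.pyRange 0 (7 * (M : Int) + 1) 1).foldl
        (fun s idx => stepA s idx (PySem.List.pyGetD (T ++ ["X"]) idx "")) initA
        = (PySem.List.enumerate (T ++ ["X"]) 0).foldl (fun s p => stepA s p.1 p.2) initA := by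
      rw [PySem.List.enumerate_eq_map_pyRange (T ++ ["X"]) "", List.foldl_map, hlen]
    rw [hconv]
    have relInit : RelAB ⟨[], [], 0, 0⟩ initA := by
      refine ⟨rfl, by simp [initA], ?_, fun _ => ⟨rfl, rfl⟩, rfl, rfl⟩
      intro h; simp at h
    obtain ⟨hrel, -⟩ := loop_rel (T ++ ["X"]) 0 ⟨[], [], 0, 0⟩ initA relInit (by simp)
    set stF := (PySem.List.enumerate (T ++ ["X"]) 0).foldl segStep ⟨[], [], 0, 0⟩ with hstF
    obtain ⟨-, -, -, -, q5, q6⟩ := hrel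
    -- the scan ends on the sentinel "X", so B's trailing run is empty and summarising it is a no-op
    have hcurnil : stF.cur = [] := by
      rw [hstF, PySem.List.enumerate_append, List.foldl_append]
      have hX : PySem.List.enumerate ["X"] (0 + (T.length : Int)) = [((0 + (T.length : Int)), "X")] := by
        simp [PySem.List.enumerate]
      rw [hX]
      simp [segStep]
    have hbest : (stF.segs ++ [(stF.curStart, stF.cur)]).foldl summarize (0, 0, 0)
        = stF.segs.foldl summarize (0, 0, 0) := by
      rw [List.foldl_append]
      show summarize _ _ = _
      rw [hcurnil, summarize_noO _ _ _ (by simp)]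
    rw [hbest, ← q5, q6]
  · -- m < 0: no cell is scheduled; both sides scan nothing and return [0, 0, 0, 0]
    have hm' : m ≤ -1 := by omega
    have hA1 : PySem.List.pyRange 0 m 1 = [] := PySem.List.pyRange_one_eq_nil (by omega)
    have hA2 : PySem.List.pyRange 0 (7 * m + 1) 1 = [] := PySem.List.pyRange_one_eq_nil (by omega)
    have hB1 : buildLineAlt matrix m = [] := by
      unfold buildLineAlt; rw [hA1]; rfl
    have hscan : PySem.List.slice (buildLineAlt matrix m ++ ["X"]) none (some (7 * m + 1))
        = [] := by
      rw [hB1]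
      have hk : (7 * m + 1 : Int) = -(((-(7 * m + 1)).toNat : Nat) : Int) := by omega
      rw [hk, PySem.List.slice_to_neg_natCast _ _ (by omega)]
      have : (([] : List String) ++ ["X"]).length - (-(7 * m + 1)).toNat = 0 := by
        simp; omega
      rw [this, List.take_zero]
    rw [hA2, hscan]
    simp [PySem.List.enumerate, initA, summarize_noO _ _ _ (by simp : ("O" : String) ∉ ([] : List String))]
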